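-- pv_equiv track=rewrite | github.com/WebAssembly/component-model | design/mvp/canonical-abi/diff.py | filter_canon_thread_functions
-- ===== SOURCE A (Python) =====
-- def normalize_line(line):
--     return line.strip()
--
-- def is_canon_thread_function(line):
--     normalized = normalize_line(line)
--     return (normalized.startswith('def canon_thread_spawn') or
--             normalized.startswith('def canon_thread_available_parallelism'))
--
-- def filter_canon_thread_functions(code_blocks):
--     filtered_blocks = []
--
--     for block in code_blocks:
--         filtered_block = []
--         i = 0
--
--         while i < len(block):
--             if is_canon_thread_function(block[i]):
--                 i += 1
--                 while i < len(block) and (not block[i].strip() or block[i].startswith(' ') or block[i].startswith('\t')):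
--                     i += 1
--             else:
--                 filtered_block.append(block[i])
--                 i += 1
--
--         if filtered_block:
--             filtered_blocks.append(filtered_block)
--
--     return filtered_blocks
-- ===== SOURCE B (Python) =====
-- def normalize_line(line):
--     return line.strip()
--
-- def is_canon_thread_function(line):
--     normalized = normalize_line(line)
--     return (normalized.startswith('def canon_thread_spawn') or
--             normalized.startswith('def canon_thread_available_parallelism'))
--
-- def _chunks(block):
--     # group the block into paragraphs: each non-blank, non-indented line starts
--     # a new chunk; blank or indented lines attach to the current chunk
--     chunks = []
--     for line in block:
--         if chunks and (not line.strip() or line.startswith(' ') or line.startswith('\t')):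
--             chunks[-1].append(line)
--         else:
--             chunks.append([line])
--     return chunks
--
-- def _truncate(chunk):
--     # keep the chunk's lines up to (excluding) its first canon_thread def
--     kept = []
--     for line in chunk:
--         if is_canon_thread_function(line):
--             break
--         kept.append(line)
--     return kept
--
-- def _filter_block(block):
--     return [line for chunk in _chunks(block) for line in _truncate(chunk)]
--
-- def filter_canon_thread_functions(code_blocks):
--     return [fb for fb in map(_filter_block, code_blocks) if fb]
-- ===== Notes on version B (the rewrite author's own statement) =====
-- stated objective: alternative
-- what changed: Replaces A's stateful index scan with a nested skip-while by a two-stage pipeline: split each block into paragraphs (a line plus its trailing blank/indented lines), truncate each paragraph at its first canon_thread def, and flatten, keeping non-empty blocks.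
import Mathlib
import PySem

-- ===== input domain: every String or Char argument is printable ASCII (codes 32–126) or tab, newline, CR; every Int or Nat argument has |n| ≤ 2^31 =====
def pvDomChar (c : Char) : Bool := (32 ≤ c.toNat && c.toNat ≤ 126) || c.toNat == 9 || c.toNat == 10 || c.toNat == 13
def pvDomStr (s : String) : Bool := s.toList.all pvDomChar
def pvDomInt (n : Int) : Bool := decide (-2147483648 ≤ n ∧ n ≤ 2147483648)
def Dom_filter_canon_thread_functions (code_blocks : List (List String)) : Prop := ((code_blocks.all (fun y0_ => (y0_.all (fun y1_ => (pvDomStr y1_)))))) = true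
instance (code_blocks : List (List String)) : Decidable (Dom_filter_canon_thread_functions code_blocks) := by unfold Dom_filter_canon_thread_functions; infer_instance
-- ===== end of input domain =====

-- B replaces A's stateful index-with-nested-while scan by a two-stage pipeline: split each
-- block into paragraphs (a line plus its blank/indented continuations), truncate each
-- paragraph at its first canon_thread def, and flatten (objective: alternative).


-- ===== PORT A =====
-- normalize_line / is_canon_thread_function (same-module helpers, shared by both Pythons)
def pvNormalizeLine (line : String) : String := PySem.Str.strip line

def pvIsCanonThreadFunction (line : String) : Bool :=
  PySem.Str.startswith (pvNormalizeLine line) "def canon_thread_spawn" ||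
  PySem.Str.startswith (pvNormalizeLine line) "def canon_thread_available_parallelism"

-- `not line.strip() or line.startswith(' ') or line.startswith('\t')`
def pvBlankOrIndent (l : String) : Bool :=
  (PySem.Str.strip l == "") || PySem.Str.startswith l " " || PySem.Str.startswith l "\t"

-- the inner `while i < len(block) and …: i += 1` (advances past blank/indented lines)
def pvSkipA (block : List String) : List String := block.dropWhile pvBlankOrIndent

-- the outer `while i < len(block)` of A, as recursion on the remaining suffix
def pvLoopA : List String → List String
  | [] => []
  | l :: rest =>
    if pvIsCanonThreadFunction l then pvLoopA (pvSkipA rest)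
    else l :: pvLoopA rest
termination_by ls => ls.length
decreasing_by
  · exact Nat.lt_succ_of_le (List.length_dropWhile_le _ _)
  · simp

def filter_canon_thread_functions (code_blocks : List (List String)) : List (List String) :=
  code_blocks.foldl
    (fun filtered_blocks block =>
      let filtered_block := pvLoopA block
      if filtered_block.isEmpty then filtered_blocks else filtered_blocks ++ [filtered_block])
    []

-- ===== PORT B =====
-- _chunks: the `for line in block` loop growing chunks[-1] or starting a new chunk
def pvChunksStep (chunks : List (List String)) (line : String) : List (List String) :=
  if !chunks.isEmpty && pvBlankOrIndent line then
    chunks.dropLast ++ [chunks.getLast! ++ [line]]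
  else
    chunks ++ [[line]]

def pvChunks (block : List String) : List (List String) :=
  block.foldl pvChunksStep []

-- _truncate: the `for line in chunk` loop with `break` at the first canon def
def pvTruncate : List String → List String
  | [] => []
  | l :: rest => if pvIsCanonThreadFunction l then [] else l :: pvTruncate rest

-- _filter_block: the flattening comprehension
def pvFilterBlockAlt (block : List String) : List String :=
  (pvChunks block).flatMap pvTruncate

def filter_canon_thread_functions_alt (code_blocks : List (List String)) : List (List String) :=
  (code_blocks.map pvFilterBlockAlt).filter (fun fb => !fb.isEmpty)

-- ===== PRECONDITION & SPEC =====
def Spec_filter_canon_thread_functions (code_blocks : List (List String)) (out : List (List String)) : Prop := out = filter_canon_thread_functions_alt code_blocks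
instance (code_blocks : List (List String)) (out : List (List String)) : Decidable (Spec_filter_canon_thread_functions code_blocks out) := by unfold Spec_filter_canon_thread_functions; infer_instance

-- ===== CLAIM (what is proved, stated in full; the proofs are below) =====
def Claim_equal_filter_canon_thread_functions : Prop := ∀ (code_blocks : List (List String)), Dom_filter_canon_thread_functions code_blocks → Spec_filter_canon_thread_functions code_blocks (filter_canon_thread_functions code_blocks)

-- ===== LEMMAS AND PROOFS =====

-- recursive characterisation of the chunking pass (proof helper)
def pvChunksR : List String → List (List String)
  | [] => []
  | l :: rest =>
    (l :: rest.takeWhile pvBlankOrIndent) :: pvChunksR (rest.dropWhile pvBlankOrIndent)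
termination_by ls => ls.length
decreasing_by
  exact Nat.lt_succ_of_le (List.length_dropWhile_le _ _)

theorem chunks_inv (ls : List String) :
    ∀ (front : List (List String)) (cur : List String),
      List.foldl pvChunksStep (front ++ [cur]) ls
        = front ++ ((cur ++ ls.takeWhile pvBlankOrIndent)
            :: pvChunksR (ls.dropWhile pvBlankOrIndent)) := by
  induction ls with
  | nil => intro front cur; simp [pvChunksR]
  | cons x xs ih =>
    intro front cur
    by_cases hb : pvBlankOrIndent x = true
    · have hstep : pvChunksStep (front ++ [cur]) x = front ++ [cur ++ [x]] := by
        simp [pvChunksStep, hb]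
      rw [List.foldl_cons, hstep, ih front (cur ++ [x])]
      simp [hb]
    · have hstep : pvChunksStep (front ++ [cur]) x = (front ++ [cur]) ++ [[x]] := by
        simp [pvChunksStep, hb]
      rw [List.foldl_cons, hstep, ih (front ++ [cur]) [x]]
      simp [hb, pvChunksR]

theorem chunks_eq (block : List String) : pvChunks block = pvChunksR block := by
  cases block with
  | nil => simp [pvChunks, pvChunksR]
  | cons l rest =>
    have hstep : pvChunksStep [] l = [] ++ [[l]] := by simp [pvChunksStep]
    unfold pvChunks
    rw [List.foldl_cons, hstep, chunks_inv rest [] [l]]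
    simp [pvChunksR]

-- the two-stage pipeline equals A's skip loop, by strong induction on length;
-- Q handles the blank/indented run after a kept head line
theorem Q_aux (n : Nat)
    (ih : ∀ m : List String, m.length ≤ n → (pvChunksR m).flatMap pvTruncate = pvLoopA m) :
    ∀ ls : List String, ls.length ≤ n →
      pvTruncate (ls.takeWhile pvBlankOrIndent)
        ++ (pvChunksR (ls.dropWhile pvBlankOrIndent)).flatMap pvTruncate = pvLoopA ls := by
  intro ls
  induction ls with
  | nil => intro _; simp [pvTruncate, pvChunksR, pvLoopA]
  | cons x xs ihq =>
    intro hlen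
    by_cases hb : pvBlankOrIndent x = true
    · by_cases hc : pvIsCanonThreadFunction x = true
      · have := ih (xs.dropWhile pvBlankOrIndent)
          (le_trans (List.length_dropWhile_le _ _) (Nat.le_of_succ_le hlen))
        simp [hb, hc, pvTruncate, pvLoopA, pvSkipA, this]
      · have := ihq (le_trans (Nat.le_succ _) hlen)
        simp [hb, hc, pvTruncate, pvLoopA] at this ⊢
        exact this
    · have := ih (x :: xs) hlen
      simp [hb, pvTruncate, this]

theorem flat_trunc_len (n : Nat) :
    ∀ ls : List String, ls.length ≤ n →
      (pvChunksR ls).flatMap pvTruncate = pvLoopA ls := by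
  induction n with
  | zero =>
    intro ls hlen
    have : ls = [] := List.length_eq_zero_iff.mp (Nat.le_zero.mp hlen)
    simp [this, pvChunksR, pvLoopA]
  | succ n ihn =>
    intro ls hlen
    cases ls with
    | nil => simp [pvChunksR, pvLoopA]
    | cons l rest =>
      have hr : rest.length ≤ n := Nat.le_of_succ_le_succ hlen
      by_cases hc : pvIsCanonThreadFunction l = true
      · have := ihn (rest.dropWhile pvBlankOrIndent)
          (le_trans (List.length_dropWhile_le _ _) hr)
        simp [pvChunksR, pvTruncate, pvLoopA, pvSkipA, hc, this]
      · have := Q_aux n ihn rest hr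
        simp [pvChunksR, pvTruncate, pvLoopA, hc, this]

theorem filter_block_eq (block : List String) : pvFilterBlockAlt block = pvLoopA block := by
  unfold pvFilterBlockAlt
  rw [chunks_eq]
  exact flat_trunc_len block.length block (le_refl _)

theorem outer_fold_eq (cbs : List (List String)) (acc : List (List String)) :
    cbs.foldl
      (fun filtered_blocks block =>
        let filtered_block := pvLoopA block
        if filtered_block.isEmpty then filtered_blocks else filtered_blocks ++ [filtered_block])
      acc = acc ++ (cbs.map pvLoopA).filter (fun fb => !fb.isEmpty) := by
  induction cbs generalizing acc with
  | nil => simp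
  | cons b rest ih =>
    rw [List.foldl_cons, ih]
    by_cases h : (pvLoopA b).isEmpty
    · simp [h]
    · simp [h]

-- ===== VERDICT (by name: the statement is the Claim_ definition above) =====
theorem filter_canon_thread_functions_spec : Claim_equal_filter_canon_thread_functions := by
  intro cbs _
  unfold Spec_filter_canon_thread_functions filter_canon_thread_functions
    filter_canon_thread_functions_alt
  rw [outer_fold_eq]
  simp only [List.nil_append]
  congr 1
  exact List.map_congr_left fun b _ => (filter_block_eq b).symm
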